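-- pv_equiv track=rewrite | github.com/vbronfman/Develop | Python/cloudity_test.py | solution
-- ===== SOURCE A (Python) =====
-- def solution(A):
--     # write your code in Python 3.
--     A.sort()
--     min=1
--
--     if A[-1] < 0:
--         return 1
--
--     for i,value in enumerate(A):
--         if A[i] < 0 :
--             continue
--
--         if A[i]>=min and ( i != len(A)-1 and A[i+1] != A[i]+1):
--             min = A[i]+1
--
--
--     if min==1:
--         return A[-1]+1
--
--     return min
-- ===== SOURCE B (Python) =====
-- def solution(A):
--     # Sort once, then walk the adjacent pairs downward from the maximum and
--     # return at the first break (a gap or a duplicate) among the positive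
--     # values; if the positives run down unbroken, return max+1, and if there
--     # are no non-negative values at all, return 1.
--     s = sorted(A)
--     if s[-1] < 0:
--         return 1
--     r = s[::-1]
--     for b, a in zip(r, r[1:]):
--         if a < 1:
--             break
--         if b != a + 1:
--             return a + 1
--     return s[-1] + 1
-- ===== Notes on version B (the rewrite author's own statement) =====
-- stated objective: simpler
-- what changed: Replaces the forward scan with a running 'min' accumulator and final accumulator test by a single backward walk over the sorted adjacent pairs that returns directly at the first break (gap or duplicate) among the positive values; Pre_ excludes only the empty list, on which both implementations raise IndexError.
import Mathlib
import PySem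

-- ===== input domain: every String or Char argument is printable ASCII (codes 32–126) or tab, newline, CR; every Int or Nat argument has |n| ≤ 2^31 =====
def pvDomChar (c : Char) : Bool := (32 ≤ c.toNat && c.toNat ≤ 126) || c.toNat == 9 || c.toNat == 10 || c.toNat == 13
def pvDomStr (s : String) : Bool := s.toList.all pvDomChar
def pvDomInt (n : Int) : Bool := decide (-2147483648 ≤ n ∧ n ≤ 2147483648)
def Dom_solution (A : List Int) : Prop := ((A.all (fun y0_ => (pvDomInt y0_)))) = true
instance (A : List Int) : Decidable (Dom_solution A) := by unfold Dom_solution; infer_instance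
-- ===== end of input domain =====

-- B replaces A's forward scan with a running 'min' accumulator by a single backward
-- walk over the sorted adjacent pairs that returns at the first break (simpler: no
-- accumulator, early exit). A sorts its argument in place; B sorts a copy — the
-- equivalence proved here is about the return value only.


-- ===== PORT A =====
-- loop body of A's 'for i,value in enumerate(A)' (named helper; same code as each step of the Python loop)
def bodyA (s : List Int) (mn : Int) (iv : Int × Int) : Int :=
  if PySem.List.pyGetD s iv.1 0 < 0 then mn
  else if PySem.List.pyGetD s iv.1 0 ≥ mn ∧
          (iv.1 ≠ (s.length : Int) - 1 ∧
           PySem.List.pyGetD s (iv.1 + 1) 0 ≠ PySem.List.pyGetD s iv.1 0 + 1) then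
    PySem.List.pyGetD s iv.1 0 + 1
  else mn

def solution (A : List Int) : Int :=
  let s := PySem.List.sorted A (fun x => x) false      -- A.sort()  (in-place in Python)
  if PySem.List.pyGetD s (-1) 0 < 0 then 1             -- A[-1] < 0  (IndexError on []: Pre_)
  else
    let mn := (PySem.List.enumerate s 0).foldl (bodyA s) 1
    if mn = 1 then PySem.List.pyGetD s (-1) 0 + 1 else mn

-- ===== PORT B =====
-- B's 'for b, a in zip(r, r[1:])' loop: early exit modelled by Option (some = return)
def loopB : List (Int × Int) → Option Int
  | [] => none
  | (b, a) :: t => if a < 1 then none else if b ≠ a + 1 then some (a + 1) else loopB t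

def solution_alt (A : List Int) : Int :=
  let s := PySem.List.sorted A (fun x => x) false      -- sorted(A)
  if PySem.List.pyGetD s (-1) 0 < 0 then 1             -- s[-1] < 0  (IndexError on []: Pre_)
  else
    let r := (PySem.List.slice? s none none (-1)).getD []   -- s[::-1] (step -1: never none)
    match loopB (r.zip (PySem.List.slice r (some 1) none)) with  -- zip(r, r[1:])
    | some v => v
    | none => PySem.List.pyGetD s (-1) 0 + 1

-- ===== PRECONDITION & SPEC =====
-- Pre_ excludes only the empty list, on which both A and B raise IndexError (A[-1] / s[-1]).
def Pre_solution (A : List Int) : Prop := A ≠ []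
instance (A : List Int) : Decidable (Pre_solution A) := by unfold Pre_solution; infer_instance
def pvWitness_solution : List Int := [1, 3, 3, -2]

def Spec_solution (A : List Int) (out : Int) : Prop := out = solution_alt A
instance (A : List Int) (out : Int) : Decidable (Spec_solution A out) := by unfold Spec_solution; infer_instance

-- ===== CLAIM (what is proved, stated in full; the proofs are below) =====
def Claim_equal_solution : Prop := ∀ (A : List Int), Dom_solution A → Pre_solution A → Spec_solution A (solution A)

-- ===== LEMMAS AND PROOFS =====

-- A's loop, written structurally on the sorted list (an element together with its successor).
def loopA (mn : Int) : List Int → Int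
  | [] => mn
  | [_] => mn
  | a :: b :: t => loopA (if a < 0 then mn else if a ≥ mn ∧ b ≠ a + 1 then a + 1 else mn) (b :: t)

-- the same loop as a running max over the qualifying values a+1
def bestQ (mn : Int) : List Int → Int
  | [] => mn
  | [_] => mn
  | a :: b :: t => bestQ (if 1 ≤ a ∧ b ≠ a + 1 then max mn (a + 1) else mn) (b :: t)

-- the qualifying candidates themselves, in left-to-right order
def cands : List Int → List Int
  | [] => []
  | [_] => []
  | a :: b :: t => (if 1 ≤ a ∧ b ≠ a + 1 then [a + 1] else []) ++ cands (b :: t)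

theorem getD_append_length (u t : List Int) (a : Int) :
    PySem.List.pyGetD (u ++ a :: t) ((u.length : Nat) : Int) 0 = a := by
  rw [PySem.List.pyGetD_natCast, List.getD_eq_getElem?_getD,
    List.getElem?_append_right (le_refl u.length)]
  simp

theorem foldA_eq_loopA : ∀ (v u : List Int) (mn : Int) (s : List Int), s = u ++ v →
    (PySem.List.enumerate v (u.length : Int)).foldl (bodyA s) mn = loopA mn v
  | [], u, mn, s, hs => by simp [PySem.List.enumerate_nil, loopA]
  | [a], u, mn, s, hs => by
    rw [PySem.List.enumerate_cons, List.foldl_cons, PySem.List.enumerate_nil,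
      List.foldl_nil]
    have hget : PySem.List.pyGetD s ((u.length : Nat) : Int) 0 = a := by
      rw [hs]; exact getD_append_length u [] a
    show bodyA s mn ((u.length : Int), a) = loopA mn [a]
    unfold bodyA loopA
    simp only [hget]
    have hfalse : ¬((u.length : Int) ≠ (s.length : Int) - 1) := by
      rw [hs]; simp
    split_ifs with h1 h2
    · rfl
    · exact absurd h2.2.1 hfalse
    · rfl
  | a :: b :: t, u, mn, s, hs => by
    rw [PySem.List.enumerate_cons, List.foldl_cons]
    have hcast : ((u.length : Int) + 1) = (((u ++ [a]).length : Nat) : Int) := by simp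
    have hs' : s = (u ++ [a]) ++ b :: t := by simp [hs]
    rw [hcast, foldA_eq_loopA (b :: t) (u ++ [a]) _ s hs']
    have hget : PySem.List.pyGetD s ((u.length : Nat) : Int) 0 = a := by
      rw [hs]; exact getD_append_length u (b :: t) a
    have hgetb : PySem.List.pyGetD s (((u.length : Nat) : Int) + 1) 0 = b := by
      rw [hcast, hs']; exact getD_append_length (u ++ [a]) t b
    have htrue : (u.length : Int) ≠ (s.length : Int) - 1 := by
      rw [hs]; simp; omega
    have hbody : bodyA s mn ((u.length : Int), a)
        = (if a < 0 then mn else if a ≥ mn ∧ b ≠ a + 1 then a + 1 else mn) := by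
      unfold bodyA
      simp only [hget, hgetb]
      split_ifs <;> simp_all
    rw [hbody]
    rfl

theorem loopA_eq_bestQ : ∀ (s : List Int) (mn : Int), s.Pairwise (· ≤ ·) →
    1 ≤ mn → (∀ x ∈ s, 1 ≤ x → mn ≤ x + 1) → loopA mn s = bestQ mn s
  | [], _, _, _, _ => rfl
  | [_], _, _, _, _ => rfl
  | a :: b :: t, mn, hpw, hmn, H => by
    simp only [loopA, bestQ]
    have ha : 1 ≤ a → mn ≤ a + 1 := H a List.mem_cons_self
    have hstep : (if a < 0 then mn else if a ≥ mn ∧ b ≠ a + 1 then a + 1 else mn)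
        = (if 1 ≤ a ∧ b ≠ a + 1 then max mn (a + 1) else mn) := by
      split_ifs <;> omega
    rw [hstep]
    refine loopA_eq_bestQ (b :: t) _ (List.pairwise_cons.1 hpw).2 ?_ ?_
    · split_ifs <;> omega
    · intro x hx hx1
      have hax : a ≤ x := (List.pairwise_cons.1 hpw).1 x hx
      have := H x (List.mem_cons_of_mem a hx) hx1
      split_ifs <;> omega

theorem bestQ_eq_foldl_max : ∀ (s : List Int) (mn : Int),
    bestQ mn s = (cands s).foldl max mn
  | [], _ => rfl
  | [_], _ => rfl
  | a :: b :: t, mn => by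
    simp only [bestQ, cands, List.foldl_append]
    split_ifs with h
    · simpa using bestQ_eq_foldl_max (b :: t) (max mn (a + 1))
    · simpa using bestQ_eq_foldl_max (b :: t) mn

theorem le_foldl_max (l : List Int) (c : Int) : c ≤ l.foldl max c := by
  induction l generalizing c with
  | nil => simp
  | cons a l ih => exact le_trans (le_max_left c a) (ih (max c a))

theorem mem_le_foldl_max (l : List Int) (c x : Int) (h : x ∈ l) : x ≤ l.foldl max c := by
  induction l generalizing c with
  | nil => simp at h
  | cons a l ih =>
    rcases List.mem_cons.1 h with rfl | h'
    · exact le_trans (le_max_right c x) (le_foldl_max l (max c x))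
    · exact ih (max c a) h'

theorem foldl_max_mem (l : List Int) (c : Int) : l.foldl max c = c ∨ l.foldl max c ∈ l := by
  induction l generalizing c with
  | nil => left; rfl
  | cons a l ih =>
    rcases ih (max c a) with h | h
    · rcases max_choice c a with hm | hm
      · left; rw [List.foldl_cons, h, hm]
      · right; rw [List.foldl_cons, h, hm]; exact List.mem_cons_self
    · right; exact List.mem_cons_of_mem a h

theorem mem_cands_iff : ∀ (s : List Int) (x : Int),
    x ∈ cands s ↔ ∃ u a b t, s = u ++ a :: b :: t ∧ 1 ≤ a ∧ b ≠ a + 1 ∧ x = a + 1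
  | [], x => by
    simp only [cands, List.not_mem_nil, false_iff]
    rintro ⟨u, a, b, t, h, -⟩
    exact absurd h (by simp)
  | [c], x => by
    simp only [cands, List.not_mem_nil, false_iff]
    rintro ⟨u, a, b, t, h, -⟩
    cases u <;> simp_all
  | a :: b :: t, x => by
    simp only [cands, List.mem_append]
    constructor
    · rintro (h1 | h2)
      · by_cases hc : 1 ≤ a ∧ b ≠ a + 1
        · simp only [if_pos hc, List.mem_singleton] at h1
          exact ⟨[], a, b, t, rfl, hc.1, hc.2, h1⟩
        · simp [if_neg hc] at h1
      · obtain ⟨u, a', b', t', heq, h1, h2, h3⟩ := (mem_cands_iff (b :: t) x).1 h2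
        exact ⟨a :: u, a', b', t', by simp [heq], h1, h2, h3⟩
    · rintro ⟨u, a', b', t', heq, h1, h2, h3⟩
      cases u with
      | nil =>
        simp only [List.nil_append, List.cons.injEq] at heq
        obtain ⟨rfl, rfl, rfl⟩ := heq
        left
        simp [if_pos (And.intro h1 h2), h3]
      | cons y u' =>
        right
        simp only [List.cons_append, List.cons.injEq] at heq
        exact (mem_cands_iff (b :: t) x).2 ⟨u', a', b', t', heq.2, h1, h2, h3⟩

theorem pairwise_le_getLast : ∀ (s : List Int) (h : s ≠ []), s.Pairwise (· ≤ ·) →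
    ∀ x ∈ s, x ≤ s.getLast h
  | [], h, _, _, _ => absurd rfl h
  | [a], _, _, x, hx => by simp at hx; simp [hx]
  | a :: b :: t, _, hpw, x, hx => by
    rw [List.getLast_cons (by simp)]
    rcases List.mem_cons.1 hx with rfl | hx'
    · exact le_trans ((List.pairwise_cons.1 hpw).1 _ (List.getLast_mem (by simp)))
        (le_refl _)
    · exact pairwise_le_getLast (b :: t) (by simp) (List.pairwise_cons.1 hpw).2 x hx'

theorem a_char (A : List Int) (M : Int)
    (hne : PySem.List.sorted A (fun x => x) false ≠ [])
    (hML : (PySem.List.sorted A (fun x => x) false).getLast hne = M) :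
    solution A = if M < 0 then 1 else
      (if (cands (PySem.List.sorted A (fun x => x) false)).foldl max 1 = 1 then M + 1
       else (cands (PySem.List.sorted A (fun x => x) false)).foldl max 1) := by
  have hpw : (PySem.List.sorted A (fun x => x) false).Pairwise (· ≤ ·) := by
    simpa using PySem.List.sorted_pairwise A (fun x => x)
  have hfold : (PySem.List.enumerate (PySem.List.sorted A (fun x => x) false) 0).foldl
      (bodyA (PySem.List.sorted A (fun x => x) false)) 1
      = (cands (PySem.List.sorted A (fun x => x) false)).foldl max 1 := by
    have h0 := foldA_eq_loopA (PySem.List.sorted A (fun x => x) false) [] 1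
      (PySem.List.sorted A (fun x => x) false) (by simp)
    rw [loopA_eq_bestQ _ 1 hpw (by omega) (fun x _ _ => by omega),
      bestQ_eq_foldl_max] at h0
    simpa using h0
  unfold solution
  simp only [PySem.List.pyGetD_neg_one _ 0 hne, hML, hfold]

-- ===== B-side lemmas =====

theorem cands_append_pair : ∀ (u : List Int) (a b : Int),
    cands (u ++ [a, b]) = cands (u ++ [a]) ++ (if 1 ≤ a ∧ b ≠ a + 1 then [a + 1] else [])
  | [], a, b => by simp [cands]
  | [x], a, b => by simp [cands]
  | x :: y :: u', a, b => by
    have ih := cands_append_pair (y :: u') a b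
    simp only [List.cons_append, cands] at ih ⊢
    rw [ih, List.append_assoc]

theorem cands_all_lt_one : ∀ (l : List Int), (∀ x ∈ l, x < 1) → cands l = []
  | [], _ => rfl
  | [_], _ => rfl
  | a :: b :: t, h => by
    have ha : a < 1 := h a List.mem_cons_self
    simp only [cands, if_neg (by omega : ¬(1 ≤ a ∧ b ≠ a + 1)), List.nil_append]
    exact cands_all_lt_one (b :: t) (fun x hx => h x (List.mem_cons_of_mem a hx))

-- B's backward walk over adjacent pairs returns the LAST (rightmost) candidate of cands
theorem loopB_eq_getLast? : ∀ (r : List Int), r.Pairwise (fun x y => y ≤ x) →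
    loopB (r.zip r.tail) = (cands r.reverse).getLast?
  | [], _ => rfl
  | [_], _ => rfl
  | b :: a :: t, hpw => by
    have hrev : (b :: a :: t).reverse = ((a :: t).reverse ++ [b]) := by simp
    have hrev2 : (a :: t).reverse = t.reverse ++ [a] := by simp
    have hc : cands ((b :: a :: t).reverse)
        = cands ((a :: t).reverse) ++ (if 1 ≤ a ∧ b ≠ a + 1 then [a + 1] else []) := by
      rw [hrev, hrev2, List.append_assoc]
      exact cands_append_pair t.reverse a b
    show loopB ((b, a) :: (a :: t).zip t) = _
    rw [hc]
    by_cases ha : a < 1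
    · have hnil : cands ((a :: t).reverse) = [] := by
        apply cands_all_lt_one
        intro x hx
        rw [List.mem_reverse] at hx
        rcases List.mem_cons.1 hx with rfl | hx'
        · exact ha
        · have := (List.pairwise_cons.1 (List.pairwise_cons.1 hpw).2).1 x hx'
          omega
      rw [hnil, if_neg (by omega : ¬(1 ≤ a ∧ b ≠ a + 1))]
      simp [loopB, ha]
    · by_cases hb : b ≠ a + 1
      · rw [if_pos (And.intro (by omega : (1:Int) ≤ a) hb), List.getLast?_concat]
        simp [loopB, ha, hb]
      · have ih := loopB_eq_getLast? (a :: t) (List.pairwise_cons.1 hpw).2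
        simp only [List.tail_cons] at ih
        rw [if_neg (by tauto : ¬(1 ≤ a ∧ b ≠ a + 1)), List.append_nil, ← ih]
        simp [loopB, ha, hb]

-- candidates are non-decreasing left to right for a sorted input
theorem cands_pairwise : ∀ (s : List Int), s.Pairwise (· ≤ ·) →
    (cands s).Pairwise (· ≤ ·)
  | [], _ => List.Pairwise.nil
  | [_], _ => List.Pairwise.nil
  | a :: b :: t, hpw => by
    simp only [cands]
    rw [List.pairwise_append]
    refine ⟨?_, cands_pairwise (b :: t) (List.pairwise_cons.1 hpw).2, ?_⟩
    · split_ifs <;> simp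
    · intro x hx y hy
      have hx1 : x = a + 1 := by
        by_cases hc : 1 ≤ a ∧ b ≠ a + 1
        · simpa [if_pos hc] using hx
        · simp [if_neg hc] at hx
      obtain ⟨u, a', b', t', heq, h1, h2, h3⟩ := (mem_cands_iff (b :: t) y).1 hy
      have ha' : a' ∈ b :: t := by rw [heq]; simp
      have : a ≤ a' := (List.pairwise_cons.1 hpw).1 a' ha'
      omega

-- ===== VERDICT (by name: the statement is the Claim_ definition above) =====
theorem solution_spec : Claim_equal_solution := by
  intro A _ hpre
  show solution A = solution_alt A
  have hne : PySem.List.sorted A (fun x => x) false ≠ [] := by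
    simpa [Ne, PySem.List.sorted_eq_nil_iff] using hpre
  set s := PySem.List.sorted A (fun x => x) false with hs
  have hpw : s.Pairwise (· ≤ ·) := by
    simpa [hs] using PySem.List.sorted_pairwise A (fun x => x)
  set M := s.getLast hne with hM
  have halt : solution_alt A = if M < 0 then 1 else
      (match (cands s).getLast? with
       | some v => v
       | none => M + 1) := by
    unfold solution_alt
    rw [← hs]
    simp only [PySem.List.pyGetD_neg_one _ 0 hne, ← hM,
      PySem.List.slice?_none_none_neg_one, Option.getD_some,
      PySem.List.slice_from_one]
    have hpwr : s.reverse.Pairwise (fun x y => y ≤ x) := by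
      rw [List.pairwise_reverse]; exact hpw
    rw [loopB_eq_getLast? s.reverse hpwr, List.reverse_reverse]
  rw [a_char A M hne rfl, halt, ← hs]
  by_cases hM0 : M < 0
  · simp [hM0]
  · simp only [if_neg hM0]
    cases hcl : (cands s).getLast? with
    | none =>
      have hnil : cands s = [] := List.getLast?_eq_none_iff.1 hcl
      simp [hnil]
    | some L =>
      have hcne : cands s ≠ [] := by
        intro h; rw [h] at hcl; simp at hcl
      have hgl : (cands s).getLast hcne = L := by
        have h2 := List.getLast?_eq_some_getLast (l := cands s) hcne
        rw [hcl] at h2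
        exact (Option.some_inj.1 h2).symm
      have hLmem : L ∈ cands s := hgl ▸ List.getLast_mem hcne
      have hL2 : 2 ≤ L := by
        obtain ⟨u, a, b, t, _, h1, _, hx⟩ := (mem_cands_iff s L).1 hLmem
        omega
      have hub : ∀ x ∈ cands s, x ≤ L := by
        intro x hx
        have hpc := cands_pairwise s hpw
        have := pairwise_le_getLast (cands s) hcne hpc x hx
        omega
      have hfold : (cands s).foldl max 1 = L := by
        apply le_antisymm
        · rcases foldl_max_mem (cands s) 1 with h | h
          · omega
          · exact hub _ h
        · exact mem_le_foldl_max _ _ _ hLmem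
      rw [hfold, if_neg (by omega)]
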